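-- pv_equiv track=rewrite | github.com/ddoctorx/yfinance-api | app/adapters/polygon_adapter.py | _map_sic_to_sector
-- ===== SOURCE A (Python) =====
-- from typing import Dict, Any, Optional, List
--
-- def _map_sic_to_sector(sic_description: Optional[str]) -> Optional[str]:
--     """
--     将SIC描述映射到标准行业分类
--     这是一个简化的映射，实际应用中可能需要更复杂的映射逻辑
--     """
--     if not sic_description:
--         return None
--
--     sic_lower = sic_description.lower()
--
--     # 简单的关键词映射
--     if any(keyword in sic_lower for keyword in ["technology", "software", "computer", "electronic"]):
--         return "Technology"
--     elif any(keyword in sic_lower for keyword in ["financial", "bank", "insurance"]):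
--         return "Financial Services"
--     elif any(keyword in sic_lower for keyword in ["healthcare", "pharmaceutical", "medical"]):
--         return "Healthcare"
--     elif any(keyword in sic_lower for keyword in ["energy", "oil", "gas"]):
--         return "Energy"
--     elif any(keyword in sic_lower for keyword in ["retail", "consumer"]):
--         return "Consumer Cyclical"
--     elif any(keyword in sic_lower for keyword in ["utilities", "electric", "water"]):
--         return "Utilities"
--     elif any(keyword in sic_lower for keyword in ["real estate", "property"]):
--         return "Real Estate"
--     elif any(keyword in sic_lower for keyword in ["industrial", "manufacturing"]):
--         return "Industrials"
--     elif any(keyword in sic_lower for keyword in ["material", "chemical", "metal"]):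
--         return "Basic Materials"
--     elif any(keyword in sic_lower for keyword in ["communication", "media", "telecom"]):
--         return "Communication Services"
--     else:
--         return "Other"
-- ===== SOURCE B (Python) =====
-- # Single-pass multi-pattern text scan: walk the text positions once, matching all
-- # keywords from a flat prioritized table and keeping the best (lowest) priority seen.
-- _FLAT = [
--     ("technology", "Technology"), ("software", "Technology"),
--     ("computer", "Technology"), ("electronic", "Technology"),
--     ("financial", "Financial Services"), ("bank", "Financial Services"),
--     ("insurance", "Financial Services"),
--     ("healthcare", "Healthcare"), ("pharmaceutical", "Healthcare"),
--     ("medical", "Healthcare"),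
--     ("energy", "Energy"), ("oil", "Energy"), ("gas", "Energy"),
--     ("retail", "Consumer Cyclical"), ("consumer", "Consumer Cyclical"),
--     ("utilities", "Utilities"), ("electric", "Utilities"), ("water", "Utilities"),
--     ("real estate", "Real Estate"), ("property", "Real Estate"),
--     ("industrial", "Industrials"), ("manufacturing", "Industrials"),
--     ("material", "Basic Materials"), ("chemical", "Basic Materials"),
--     ("metal", "Basic Materials"),
--     ("communication", "Communication Services"), ("media", "Communication Services"),
--     ("telecom", "Communication Services"),
-- ]
--
-- def _map_sic_to_sector(sic_description):
--     if not sic_description: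
--         return None
--     s = sic_description.lower()
--     best = len(_FLAT)
--     for i in range(len(s)):
--         for prio, (kw, _sector) in enumerate(_FLAT):
--             if prio < best and s.startswith(kw, i):
--                 best = prio
--     return _FLAT[best][1] if best < len(_FLAT) else "Other"
-- ===== Notes on version B (the rewrite author's own statement) =====
-- stated objective: alternative
-- what changed: Instead of testing each keyword group with substring searches in an if/elif chain, B scans the lowered text position by position once, matching a flat prioritized keyword table at each position and keeping the lowest priority found, then maps that priority back to its sector.
import Mathlib
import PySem

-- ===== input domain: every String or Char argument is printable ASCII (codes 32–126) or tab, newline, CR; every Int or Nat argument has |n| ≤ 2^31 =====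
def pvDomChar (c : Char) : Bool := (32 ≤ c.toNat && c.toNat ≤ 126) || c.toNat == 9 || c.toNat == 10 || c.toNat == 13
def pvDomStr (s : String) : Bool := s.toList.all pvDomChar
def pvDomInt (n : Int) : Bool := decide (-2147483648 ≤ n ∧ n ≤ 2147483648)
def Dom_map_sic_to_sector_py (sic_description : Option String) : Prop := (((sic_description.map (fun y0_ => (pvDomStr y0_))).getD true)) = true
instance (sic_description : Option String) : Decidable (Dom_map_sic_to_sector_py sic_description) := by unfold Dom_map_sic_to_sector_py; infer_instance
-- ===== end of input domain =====

-- B replaces A's per-keyword branch chain by a single left-to-right scan of the text,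
-- matching a flat prioritized keyword table at each position and keeping the lowest
-- priority found (alternative algorithm, same asymptotic cost, not faster).


-- ===== PORT A =====
def map_sic_to_sector_py (sic_description : Option String) : Option String :=
  match sic_description with
  | none => none
  | some s =>
    if s = "" then none
    else
      let sic_lower := PySem.Str.lower s
      if ["technology", "software", "computer", "electronic"].any (fun k => PySem.Str.isIn k sic_lower) then some "Technology"
      else if ["financial", "bank", "insurance"].any (fun k => PySem.Str.isIn k sic_lower) then some "Financial Services"
      else if ["healthcare", "pharmaceutical", "medical"].any (fun k => PySem.Str.isIn k sic_lower) then some "Healthcare"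
      else if ["energy", "oil", "gas"].any (fun k => PySem.Str.isIn k sic_lower) then some "Energy"
      else if ["retail", "consumer"].any (fun k => PySem.Str.isIn k sic_lower) then some "Consumer Cyclical"
      else if ["utilities", "electric", "water"].any (fun k => PySem.Str.isIn k sic_lower) then some "Utilities"
      else if ["real estate", "property"].any (fun k => PySem.Str.isIn k sic_lower) then some "Real Estate"
      else if ["industrial", "manufacturing"].any (fun k => PySem.Str.isIn k sic_lower) then some "Industrials"
      else if ["material", "chemical", "metal"].any (fun k => PySem.Str.isIn k sic_lower) then some "Basic Materials"
      else if ["communication", "media", "telecom"].any (fun k => PySem.Str.isIn k sic_lower) then some "Communication Services"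
      else some "Other"

-- ===== PORT B =====
-- flat prioritized (keyword, sector) table, highest priority first (Source B's _FLAT)
def pvFlat : List (String × String) :=
  [("technology", "Technology"), ("software", "Technology"),
   ("computer", "Technology"), ("electronic", "Technology"),
   ("financial", "Financial Services"), ("bank", "Financial Services"),
   ("insurance", "Financial Services"),
   ("healthcare", "Healthcare"), ("pharmaceutical", "Healthcare"),
   ("medical", "Healthcare"),
   ("energy", "Energy"), ("oil", "Energy"), ("gas", "Energy"),
   ("retail", "Consumer Cyclical"), ("consumer", "Consumer Cyclical"),
   ("utilities", "Utilities"), ("electric", "Utilities"), ("water", "Utilities"),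
   ("real estate", "Real Estate"), ("property", "Real Estate"),
   ("industrial", "Industrials"), ("manufacturing", "Industrials"),
   ("material", "Basic Materials"), ("chemical", "Basic Materials"),
   ("metal", "Basic Materials"),
   ("communication", "Communication Services"), ("media", "Communication Services"),
   ("telecom", "Communication Services")]

def map_sic_to_sector_py_alt (sic_description : Option String) : Option String :=
  match sic_description with
  | none => none
  | some sd =>
    if sd = "" then none
    else
      let s := PySem.Str.lower sd
      -- best = len(_FLAT); the two nested for-loops as folds over the same state
      let best : Int :=
        (PySem.List.pyRange 0 (PySem.Str.len s) 1).foldl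
          (fun best i =>
            (PySem.List.enumerate pvFlat 0).foldl
              (fun best pe =>
                -- s.startswith(kw, i) with 0 ≤ i < len(s): exactly startswith on the chars from position i
                if pe.1 < best ∧ PySem.Chars.startswith (s.toList.drop i.toNat) pe.2.1.toList
                then pe.1 else best)
              best)
          (pvFlat.length : Int)
      if best < (pvFlat.length : Int)
      then (PySem.List.pyGet? pvFlat best).map (fun e => e.2)   -- _FLAT[best][1]
      else some "Other"

-- ===== PRECONDITION & SPEC =====
def Spec_map_sic_to_sector_py (sic_description : Option String) (out : Option String) : Prop := out = map_sic_to_sector_py_alt sic_description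
instance (sic_description : Option String) (out : Option String) : Decidable (Spec_map_sic_to_sector_py sic_description out) := by unfold Spec_map_sic_to_sector_py; infer_instance

-- ===== CLAIM (what is proved, stated in full; the proofs are below) =====
def Claim_equal_map_sic_to_sector_py : Prop := ∀ (sic_description : Option String), Dom_map_sic_to_sector_py sic_description → Spec_map_sic_to_sector_py sic_description (map_sic_to_sector_py sic_description)

-- ===== LEMMAS AND PROOFS =====

-- reference form: first-match recursion over a (keyword, sector) table
def pvFirst (Q : String → Bool) : List (String × String) → String
  | [] => "Other"
  | (kw, sec) :: r => if Q kw then sec else pvFirst Q r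

lemma pv_if_or {α : Type} (a b : Bool) (x y : α) :
    (if (a || b) = true then x else y) = (if a = true then x else if b = true then x else y) := by
  cases a <;> simp

-- A's branch chain is pvFirst over the flattened table
lemma pv_chainA (sl : String) :
    (if ["technology", "software", "computer", "electronic"].any (fun k => PySem.Str.isIn k sl) then some "Technology"
     else if ["financial", "bank", "insurance"].any (fun k => PySem.Str.isIn k sl) then some "Financial Services"
     else if ["healthcare", "pharmaceutical", "medical"].any (fun k => PySem.Str.isIn k sl) then some "Healthcare"
     else if ["energy", "oil", "gas"].any (fun k => PySem.Str.isIn k sl) then some "Energy"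
     else if ["retail", "consumer"].any (fun k => PySem.Str.isIn k sl) then some "Consumer Cyclical"
     else if ["utilities", "electric", "water"].any (fun k => PySem.Str.isIn k sl) then some "Utilities"
     else if ["real estate", "property"].any (fun k => PySem.Str.isIn k sl) then some "Real Estate"
     else if ["industrial", "manufacturing"].any (fun k => PySem.Str.isIn k sl) then some "Industrials"
     else if ["material", "chemical", "metal"].any (fun k => PySem.Str.isIn k sl) then some "Basic Materials"
     else if ["communication", "media", "telecom"].any (fun k => PySem.Str.isIn k sl) then some "Communication Services"
     else some "Other")
    = some (pvFirst (fun kw => PySem.Str.isIn kw sl) pvFlat) := by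
  simp only [pvFlat, pvFirst, List.any_cons, List.any_nil, Bool.or_false, pv_if_or,
    apply_ite some]

-- nested-loop state: "if prio < best and match then prio" equals a min-accumulation
lemma pv_inner (P : Int × String × String → Bool) :
    ∀ (l : List (Int × String × String)) (b : Int),
      l.foldl (fun b pe => if pe.1 < b ∧ P pe then pe.1 else b) b
        = l.foldl (fun b pe => if P pe then min b pe.1 else b) b := by
  intro l
  induction l with
  | nil => intro b; rfl
  | cons pe r ih =>
    intro b
    simp only [List.foldl_cons]
    have : (if pe.1 < b ∧ P pe then pe.1 else b) = (if P pe then min b pe.1 else b) := by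
      by_cases h : P pe = true <;> simp [h, Int.min_def] <;> omega
    rw [this, ih]

-- min-accumulation over a condition = min-fold over the filtered, projected list
lemma pv_filter (P : Int × String × String → Bool) :
    ∀ (l : List (Int × String × String)) (b : Int),
      l.foldl (fun b pe => if P pe then min b pe.1 else b) b
        = ((l.filter P).map (fun pe => pe.1)).foldl min b := by
  intro l
  induction l with
  | nil => intro b; rfl
  | cons pe r ih =>
    intro b
    by_cases h : P pe = true <;> simp [h, ih]

-- folding a min-fold over a list of lists = one min-fold over the concatenation
lemma pv_flatMap (V : Int → List Int) :
    ∀ (I : List Int) (b : Int),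
      I.foldl (fun b i => (V i).foldl min b) b = (I.flatMap V).foldl min b := by
  intro I
  induction I with
  | nil => intro b; rfl
  | cons i r ih => intro b; simp [List.foldl_append, ih]

lemma pv_min_le_init : ∀ (xs : List Int) (b : Int), xs.foldl min b ≤ b := by
  intro xs
  induction xs with
  | nil => intro b; simp
  | cons x r ih => intro b; exact le_trans (ih (min b x)) (min_le_left _ _)

lemma pv_min_le_mem : ∀ (xs : List Int) (b a : Int), a ∈ xs → xs.foldl min b ≤ a := by
  intro xs
  induction xs with
  | nil => intro b a h; simp at h
  | cons x r ih =>
    intro b a h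
    rcases List.mem_cons.mp h with h | h
    · subst h; exact le_trans (pv_min_le_init r (min b a)) (min_le_right _ _)
    · exact ih (min b x) a h

lemma pv_min_mem : ∀ (xs : List Int) (b : Int), xs.foldl min b = b ∨ xs.foldl min b ∈ xs := by
  intro xs
  induction xs with
  | nil => intro b; left; rfl
  | cons x r ih =>
    intro b
    rcases ih (min b x) with h | h
    · simp only [List.foldl_cons, h]
      by_cases hbx : b ≤ x
      · left; exact min_eq_left hbx
      · right
        rw [min_eq_right (le_of_not_ge hbx)]
        exact List.mem_cons_self
    · right; exact List.mem_cons_of_mem _ h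

lemma pv_min_fold_le (xs ys : List Int) (b : Int) (h : ∀ a ∈ ys, a ∈ xs) :
    xs.foldl min b ≤ ys.foldl min b := by
  rcases pv_min_mem ys b with hy | hy
  · rw [hy]; exact pv_min_le_init xs b
  · exact pv_min_le_mem xs b _ (h _ hy)

lemma pv_min_congr (xs ys : List Int) (b : Int) (h : ∀ a, a ∈ xs ↔ a ∈ ys) :
    xs.foldl min b = ys.foldl min b :=
  le_antisymm (pv_min_fold_le xs ys b fun a ha => (h a).mpr ha)
    (pv_min_fold_le ys xs b fun a ha => (h a).mp ha)

lemma pv_min_of_ge : ∀ (xs : List Int) (b : Int), (∀ a ∈ xs, b ≤ a) → xs.foldl min b = b := by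
  intro xs
  induction xs with
  | nil => intro b _; rfl
  | cons x r ih =>
    intro b h
    simp only [List.foldl_cons, min_eq_left (h x List.mem_cons_self)]
    exact ih b fun a ha => h a (List.mem_cons_of_mem _ ha)

-- a nonempty keyword occurs at some scanned position iff it is a substring
lemma pv_exists_pos (t kw : List Char) (hkw : kw ≠ []) :
    (∃ i ∈ PySem.List.pyRange 0 (t.length : Int) 1,
        PySem.Chars.startswith (t.drop i.toNat) kw = true)
      ↔ PySem.Chars.isIn kw t = true := by
  rw [← PySem.Chars.exists_prefix_drop_iff_isIn]
  constructor
  · rintro ⟨i, _, hs⟩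
    exact ⟨i.toNat, (PySem.Chars.startswith_iff _ _).mp hs⟩
  · rintro ⟨j, hj⟩
    by_cases hlen : t.length ≤ j
    · rw [List.drop_eq_nil_of_le hlen] at hj
      exact absurd (List.prefix_nil.mp hj) hkw
    · refine ⟨(j : Int), PySem.List.mem_pyRange_one.mpr ⟨by positivity, by omega⟩, ?_⟩
      rw [Int.toNat_natCast]
      exact (PySem.Chars.startswith_iff _ _).mpr hj

-- the min-fold over the filtered enumeration computes findIdx (offset version)
lemma pv_findIdx (Q : String → Bool) :
    ∀ (l : List (String × String)) (s : Nat),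
      ((((PySem.List.enumerate l (s : Int)).filter (fun pe => Q pe.2.1)).map
          (fun pe => pe.1))).foldl min ((s + l.length : Nat) : Int)
        = ((s + l.findIdx (fun e => Q e.1) : Nat) : Int) := by
  intro l
  induction l with
  | nil => intro s; simp [PySem.List.enumerate_nil]
  | cons e r ih =>
    intro s
    obtain ⟨kw, sec⟩ := e
    rw [PySem.List.enumerate_cons]
    by_cases h : Q kw = true
    · rw [List.filter_cons_of_pos (by simpa using h)]
      simp only [List.map_cons, List.foldl_cons, List.length_cons, List.findIdx_cons, h,
        cond_true]
      have hmin : min ((s + (r.length + 1) : Nat) : Int) (s : Int) = (s : Int) := by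
        apply min_eq_right; push_cast; omega
      rw [hmin]
      have hge : ∀ a ∈ ((PySem.List.enumerate r ((s : Int) + 1)).filter
          (fun pe => Q pe.2.1)).map (fun pe => pe.1), (s : Int) ≤ a := by
        intro a ha
        rcases List.mem_map.mp ha with ⟨pe, hpe, rfl⟩
        rcases (PySem.List.mem_enumerate_iff _ _ _).mp (List.mem_filter.mp hpe).1
          with ⟨k, _, rfl⟩
        push_cast; omega
      rw [pv_min_of_ge _ _ hge]
      simp
    · rw [List.filter_cons_of_neg (by simpa using h)]
      simp only [List.length_cons, List.findIdx_cons, h, cond_false]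
      have h1 : ((s : Int) + 1) = ((s + 1 : Nat) : Int) := by push_cast; ring
      have h2 : ((s + (r.length + 1) : Nat) : Int)
          = (((s + 1) + r.length : Nat) : Int) := by push_cast; ring
      rw [h1, h2, ih (s + 1)]
      push_cast; ring

-- turning findIdx into the first-match recursion and the final indexing step
lemma pv_final (Q : String → Bool) :
    ∀ (l : List (String × String)),
      (if ((l.findIdx (fun e => Q e.1) : Nat) : Int) < (l.length : Int)
       then (PySem.List.pyGet? l ((l.findIdx (fun e => Q e.1) : Nat) : Int)).map (fun e => e.2)
       else some "Other") = some (pvFirst Q l) := by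
  intro l
  induction l with
  | nil => simp [pvFirst]
  | cons e r ih =>
    obtain ⟨kw, sec⟩ := e
    by_cases h : Q kw = true
    · simp [List.findIdx_cons, h, pvFirst]
    · have hidx : (((kw, sec) :: r).findIdx (fun e => Q e.1)) = r.findIdx (fun e => Q e.1) + 1 := by
        simp [List.findIdx_cons, h]
      rw [hidx, PySem.List.pyGet?_natCast]
      rw [PySem.List.pyGet?_natCast] at ih
      have hc : (((r.findIdx (fun e => Q e.1) + 1 : Nat)) : Int) < (((kw, sec) :: r).length : Int)
          ↔ ((r.findIdx (fun e => Q e.1) : Nat) : Int) < (r.length : Int) := by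
        simp only [List.length_cons]; push_cast; omega
      rw [if_congr hc rfl rfl, List.getElem?_cons_succ]
      simp only [pvFirst, h, if_false, Bool.false_eq_true]
      exact ih

-- every keyword in the table is nonempty
lemma pv_kw_ne : ∀ e ∈ pvFlat, e.1.toList ≠ [] := by decide

-- the double fold of B computes the first matching flat index (as an Int)
lemma pv_best (sl : String) :
    (PySem.List.pyRange 0 (PySem.Str.len sl) 1).foldl
        (fun best i =>
          (PySem.List.enumerate pvFlat 0).foldl
            (fun best pe =>
              if pe.1 < best ∧ PySem.Chars.startswith (sl.toList.drop i.toNat) pe.2.1.toList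
              then pe.1 else best) best)
        (pvFlat.length : Int)
      = ((pvFlat.findIdx (fun e => PySem.Str.isIn e.1 sl) : Nat) : Int) := by
  rw [PySem.Str.len_eq]
  have e1 : (fun (best i : Int) =>
      (PySem.List.enumerate pvFlat 0).foldl
        (fun best pe =>
          if pe.1 < best ∧ PySem.Chars.startswith (sl.toList.drop i.toNat) pe.2.1.toList
          then pe.1 else best) best)
      = fun (best i : Int) =>
        (((PySem.List.enumerate pvFlat 0).filter
            (fun pe => PySem.Chars.startswith (sl.toList.drop i.toNat) pe.2.1.toList)).map
          (fun pe => pe.1)).foldl min best := by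
    funext best i
    rw [pv_inner, pv_filter]
  rw [e1, pv_flatMap]
  rw [pv_min_congr _ (((PySem.List.enumerate pvFlat 0).filter
      (fun pe => PySem.Chars.isIn pe.2.1.toList sl.toList)).map (fun pe => pe.1)) _ ?_]
  · have h0 := pv_findIdx (fun kw => PySem.Chars.isIn kw.toList sl.toList) pvFlat 0
    simp only [Nat.cast_zero, zero_add] at h0
    rw [h0]
    simp only [PySem.Str.isIn_eq]
  · intro a
    simp only [List.mem_flatMap, List.mem_map, List.mem_filter]
    constructor
    · rintro ⟨i, hi, pe, ⟨⟨hpeE, hpeC⟩, rfl⟩⟩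
      refine ⟨pe, ⟨hpeE, ?_⟩, rfl⟩
      exact (pv_exists_pos sl.toList pe.2.1.toList (pv_kw_ne _ (by
        rcases (PySem.List.mem_enumerate_iff _ _ _).mp hpeE with ⟨k, hk, rfl⟩
        exact List.getElem_mem hk))).mp ⟨i, hi, hpeC⟩
    · rintro ⟨pe, ⟨hpeE, hpeQ⟩, rfl⟩
      rcases (pv_exists_pos sl.toList pe.2.1.toList (pv_kw_ne _ (by
        rcases (PySem.List.mem_enumerate_iff _ _ _).mp hpeE with ⟨k, hk, rfl⟩
        exact List.getElem_mem hk))).mpr hpeQ with ⟨i, hi, hs⟩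
      exact ⟨i, hi, pe, ⟨⟨hpeE, hs⟩, rfl⟩⟩

-- ===== VERDICT (by name: the statement is the Claim_ definition above) =====
theorem map_sic_to_sector_py_spec : Claim_equal_map_sic_to_sector_py := by
  intro sic _
  unfold Spec_map_sic_to_sector_py map_sic_to_sector_py map_sic_to_sector_py_alt
  cases sic with
  | none => rfl
  | some s =>
    simp only
    by_cases h : s = ""
    · subst h; rfl
    · rw [if_neg h, if_neg h]
      rw [pv_chainA (PySem.Str.lower s), pv_best (PySem.Str.lower s)]
      exact (pv_final (fun kw => PySem.Str.isIn kw (PySem.Str.lower s)) pvFlat).symm
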